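-- pv_equiv track=rewrite | github.com/DivyTej/IP-Extractor | public_ip_extractor.py | is_public_ipv4
-- ===== SOURCE A (Python) =====
-- import ipaddress
--
-- PRIVATE_IPV4_RANGES = [
--     ipaddress.IPv4Network("10.0.0.0/8"),
--     ipaddress.IPv4Network("172.16.0.0/12"),
--     ipaddress.IPv4Network("192.168.0.0/16"),
--     ipaddress.IPv4Network("127.0.0.0/8")  # Localhost range for IPv4
-- ]
--
-- MULTICAST_IPV4_RANGE = ipaddress.IPv4Network("224.0.0.0/4")
--
-- def is_public_ipv4(ip):
--     try:
--         ip_obj = ipaddress.IPv4Address(ip)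
--         for private_range in PRIVATE_IPV4_RANGES:
--             if ip_obj in private_range:
--                 return False
--         if ip_obj in MULTICAST_IPV4_RANGE:
--             return False
--         return True
--     except ValueError:
--         return False
-- ===== SOURCE B (Python) =====
-- import re
--
-- _OCT = r'25[0-5]|2[0-4][0-9]|1[0-9][0-9]|[1-9]?[0-9]'
-- _IPV4 = re.compile(r'({o})\.({o})\.({o})\.({o})'.format(o=_OCT))
--
-- def is_public_ipv4(ip):
--     m = _IPV4.fullmatch(ip)
--     if m is None:
--         return False
--     o0 = int(m.group(1))
--     o1 = int(m.group(2))
--     if o0 == 10 or o0 == 127: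
--         return False
--     if o0 == 172 and 16 <= o1 <= 31:
--         return False
--     if o0 == 192 and o1 == 168:
--         return False
--     return not (224 <= o0 <= 239)
-- ===== Notes on version B (the rewrite author's own statement) =====
-- stated objective: simpler
-- what changed: B drops the ipaddress objects entirely: one strict dotted-quad regex fullmatch validates the address and captures the octets, and direct conditionals on the first two octets replace the loop over IPv4Network containment tests (10/8, 127/8, 172.16/12, 192.168/16, 224/4).
import Mathlib
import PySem

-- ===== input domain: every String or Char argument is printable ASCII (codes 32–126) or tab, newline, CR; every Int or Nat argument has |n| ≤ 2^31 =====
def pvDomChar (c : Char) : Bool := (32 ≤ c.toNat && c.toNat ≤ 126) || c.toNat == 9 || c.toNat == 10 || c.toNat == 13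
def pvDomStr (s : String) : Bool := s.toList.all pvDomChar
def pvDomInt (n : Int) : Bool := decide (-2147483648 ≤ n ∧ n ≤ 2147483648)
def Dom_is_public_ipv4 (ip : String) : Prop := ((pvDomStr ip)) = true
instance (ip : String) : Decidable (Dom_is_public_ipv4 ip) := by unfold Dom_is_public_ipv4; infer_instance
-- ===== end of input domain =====

-- B replaces A's ipaddress parse + loop over IPv4Network containment tests with the
-- canonical strict dotted-quad regex and direct conditionals on the first two octets;
-- objective: simpler.

-- ===== PORT A =====
-- Port of `ipaddress.IPv4Address(ip)` (CPython _ip_int_from_string), returning the four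
-- octets, `none` = ValueError. Exact on the printable-ASCII domain: exactly 4 dot-separated
-- parts, each 1-3 ASCII digits, no leading zeros, value ≤ 255.
def pvParseOctet? (s : List Char) : Option Int :=
  if s.length = 0 then none                               -- "Empty octet"
  else if 3 < s.length then none                          -- "At most 3 characters"
  else if ¬ (s.all PySem.Chars.isdigit) then none         -- "Only decimal digits"
  else if 1 < s.length ∧ s.head? = some '0' then none     -- "Leading zeros are not permitted"
  else if 255 < s.foldl (fun a c => a * 10 + (c.toNat - 48)) 0   -- "Octet must be <= 255"; the foldl is int(octet_str, 10)
    then none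
  else some ((s.foldl (fun a c => a * 10 + (c.toNat - 48)) 0 : Nat) : Int)

def pvParseIPv4? (ip : String) : Option (Int × Int × Int × Int) :=
  match (PySem.Chars.splitOn ip.toList ['.']).map pvParseOctet? with   -- addr.split('.')
  | [some a, some b, some c, some d] => some (a, b, c, d)              -- "Expected 4 octets"
  | _ => none

-- Each IPv4Network constant as its (network_address, broadcast_address) integer pair;
-- `ip_obj in network` is CPython's network_address <= int(ip) <= broadcast_address.
def pvPRIVATE_IPV4_RANGES : List (Int × Int) :=
  [(167772160, 184549375),     -- 10.0.0.0/8
   (2886729728, 2887778303),   -- 172.16.0.0/12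
   (3232235520, 3232301055),   -- 192.168.0.0/16
   (2130706432, 2147483647)]   -- 127.0.0.0/8

-- int(ip_obj): the packed 32-bit value of the four octets
def pvPackedInt (o0 o1 o2 o3 : Int) : Int := ((o0 * 256 + o1) * 256 + o2) * 256 + o3

def pvInAnyPrivate (addr : Int) : List (Int × Int) → Bool
  | [] => false
  | (lo, hi) :: rest => if lo ≤ addr ∧ addr ≤ hi then true else pvInAnyPrivate addr rest

def is_public_ipv4 (ip : String) : Bool :=
  match pvParseIPv4? ip with
  | none => false                                         -- except ValueError: return False
  | some (o0, o1, o2, o3) =>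
    if pvInAnyPrivate (pvPackedInt o0 o1 o2 o3) pvPRIVATE_IPV4_RANGES then false
    else if 3758096384 ≤ pvPackedInt o0 o1 o2 o3 ∧ pvPackedInt o0 o1 o2 o3 ≤ 4026531839 then false  -- 224.0.0.0/4
    else true

-- ===== PORT B =====
-- Hand port of Source B's regex octet alternation 25[0-5]|2[0-4][0-9]|1[0-9][0-9]|[1-9]?[0-9],
-- exact on the domain: alternatives grouped by candidate length, character classes written
-- as code-point ranges ('0'-'9' = 48-57, '2' = 50, '5' = 53, '1' = 49, '4' = 52).
def pvOctetMatch : List Char → Bool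
  | [c] => 48 ≤ c.toNat && c.toNat ≤ 57                                   -- [1-9]?[0-9] with the option empty
  | [c1, c2] => (49 ≤ c1.toNat && c1.toNat ≤ 57) && (48 ≤ c2.toNat && c2.toNat ≤ 57)   -- [1-9][0-9]
  | [c1, c2, c3] =>
      (c1.toNat == 50 && c2.toNat == 53 && (48 ≤ c3.toNat && c3.toNat ≤ 53)) ||        -- 25[0-5]
      (c1.toNat == 50 && (48 ≤ c2.toNat && c2.toNat ≤ 52) && (48 ≤ c3.toNat && c3.toNat ≤ 57)) ||  -- 2[0-4][0-9]
      (c1.toNat == 49 && (48 ≤ c2.toNat && c2.toNat ≤ 57) && (48 ≤ c3.toNat && c3.toNat ≤ 57))     -- 1[0-9][0-9]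
  | _ => false

-- int(m.group(i)) of a matched octet
def pvOctetVal (s : List Char) : Int := ((s.foldl (fun a c => a * 10 + (c.toNat - 48)) 0 : Nat) : Int)

-- fullmatch of the dotted quad pattern: since no octet alternative can contain '.',
-- it is exactly "split on '.' yields 4 parts, each matching the octet pattern".
def is_public_ipv4_alt (ip : String) : Bool :=
  match PySem.Chars.splitOn ip.toList ['.'] with
  | [p0, p1, p2, p3] =>
    if pvOctetMatch p0 && pvOctetMatch p1 && pvOctetMatch p2 && pvOctetMatch p3 then
      let o0 := pvOctetVal p0
      let o1 := pvOctetVal p1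
      if o0 = 10 ∨ o0 = 127 then false
      else if o0 = 172 ∧ 16 ≤ o1 ∧ o1 ≤ 31 then false
      else if o0 = 192 ∧ o1 = 168 then false
      else !decide (224 ≤ o0 ∧ o0 ≤ 239)
    else false
  | _ => false

-- ===== PRECONDITION & SPEC =====
def Spec_is_public_ipv4 (ip : String) (out : Bool) : Prop := out = is_public_ipv4_alt ip
instance (ip : String) (out : Bool) : Decidable (Spec_is_public_ipv4 ip out) := by unfold Spec_is_public_ipv4; infer_instance

-- ===== CLAIM (what is proved, stated in full; the proofs are below) =====
def Claim_equal_is_public_ipv4 : Prop := ∀ (ip : String), Dom_is_public_ipv4 ip → Spec_is_public_ipv4 ip (is_public_ipv4 ip)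

-- ===== LEMMAS AND PROOFS =====
lemma pv_isdigit_eq (c : Char) : PySem.Chars.isdigit c = (48 ≤ c.toNat && c.toNat ≤ 57) := by
  have h1 : ('0' ≤ c) ↔ (48 ≤ c.toNat) := by rw [Char.le_def]; exact ⟨fun h => h, fun h => h⟩
  have h2 : (c ≤ '9') ↔ (c.toNat ≤ 57) := by rw [Char.le_def]; exact ⟨fun h => h, fun h => h⟩
  simp [PySem.Chars.isdigit, h1, h2]

lemma pv_head_zero (c : Char) : (some c = some '0') ↔ c.toNat = 48 := by
  constructor
  · intro h; rw [Option.some.injEq] at h; subst h; rfl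
  · intro h
    rw [Option.some.injEq]
    apply Char.ext
    have : c.val.toNat = (48 : Nat) := h
    exact UInt32.toNat_inj.mp this

-- A's octet parser agrees with B's regex octet match: same accepted strings, same value.
lemma pvOctet_eq (s : List Char) :
    pvParseOctet? s = if pvOctetMatch s then some (pvOctetVal s) else none := by
  match s with
  | [] => rfl
  | [c] =>
    simp only [pvParseOctet?, pvOctetMatch, pvOctetVal, List.all_cons, List.all_nil,
      List.foldl, List.length, List.head?, pv_isdigit_eq, pv_head_zero,
      Bool.and_true, Bool.and_eq_true, decide_eq_true_eq]
    split_ifs <;> first | rfl | omega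
  | [c1, c2] =>
    simp only [pvParseOctet?, pvOctetMatch, pvOctetVal, List.all_cons, List.all_nil,
      List.foldl, List.length, List.head?, pv_isdigit_eq, pv_head_zero,
      Bool.and_true, Bool.and_eq_true, decide_eq_true_eq]
    split_ifs <;> first | rfl | omega
  | [c1, c2, c3] =>
    simp only [pvParseOctet?, pvOctetMatch, pvOctetVal, List.all_cons, List.all_nil,
      List.foldl, List.length, List.head?, pv_isdigit_eq, pv_head_zero,
      Bool.and_true, Bool.and_eq_true, Bool.or_eq_true, decide_eq_true_eq, beq_iff_eq]
    split_ifs <;> first | rfl | omega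
  | c1 :: c2 :: c3 :: c4 :: t =>
    simp only [pvParseOctet?, pvOctetMatch, List.length]
    split_ifs <;> first | rfl | omega

lemma pvOctetVal_bounds (s : List Char) (h : pvOctetMatch s = true) :
    0 ≤ pvOctetVal s ∧ pvOctetVal s ≤ 255 := by
  match s with
  | [] => simp [pvOctetMatch] at h
  | [c] =>
    simp only [pvOctetMatch, Bool.and_eq_true, decide_eq_true_eq] at h
    simp only [pvOctetVal, List.foldl]; omega
  | [c1, c2] =>
    simp only [pvOctetMatch, Bool.and_eq_true, decide_eq_true_eq] at h
    simp only [pvOctetVal, List.foldl]; omega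
  | [c1, c2, c3] =>
    simp only [pvOctetMatch, Bool.and_eq_true, Bool.or_eq_true, decide_eq_true_eq,
      beq_iff_eq] at h
    simp only [pvOctetVal, List.foldl]; omega
  | c1 :: c2 :: c3 :: c4 :: t => simp [pvOctetMatch] at h

-- ===== VERDICT (by name: the statement is the Claim_ definition above) =====
theorem is_public_ipv4_spec : Claim_equal_is_public_ipv4 := by
  intro ip _
  unfold Spec_is_public_ipv4 is_public_ipv4 is_public_ipv4_alt pvParseIPv4?
  rcases h : PySem.Chars.splitOn ip.toList ['.'] with _ | ⟨p0, _ | ⟨p1, _ | ⟨p2, _ | ⟨p3, _ | ⟨p4, t⟩⟩⟩⟩⟩ <;>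
    simp only [List.map, pvOctet_eq]
  case cons.cons.cons.cons.nil =>
    cases h0 : pvOctetMatch p0 <;> cases h1 : pvOctetMatch p1 <;>
    cases h2 : pvOctetMatch p2 <;> cases h3 : pvOctetMatch p3 <;>
      simp only [h0, h1, h2, h3, Bool.false_and, Bool.and_false,
        Bool.true_and, Bool.and_true, Bool.and_self, ite_true, ite_false] <;>
      try rfl
    -- all four octets match: both sides classify the same address
    obtain ⟨l0, u0⟩ := pvOctetVal_bounds p0 h0
    obtain ⟨l1, u1⟩ := pvOctetVal_bounds p1 h1
    obtain ⟨l2, u2⟩ := pvOctetVal_bounds p2 h2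
    obtain ⟨l3, u3⟩ := pvOctetVal_bounds p3 h3
    simp only [pvPRIVATE_IPV4_RANGES, pvInAnyPrivate, pvPackedInt]
    split_ifs <;> first | rfl | omega | (simp_all <;> omega)
  all_goals split_ifs <;> rfl
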